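-- pv_equiv track=rewrite | github.com/BellOne4222/Programmars | 프로그래머스/unrated/138476. 귤 고르기/귤 고르기.py | solution
-- ===== SOURCE A (Python) =====
-- from collections import Counter
--
-- def solution(k, tangerine):
--     tan_counter = Counter(tangerine)
--     tanger_dict = dict(sorted(tan_counter.items(), key=lambda x: x[1], reverse=True))
--
--     tangerines = 0
--     result = 0
--     for tangerine, count in tanger_dict.items():
--         if tangerines >= k:
--             break
--         tangerines += count
--         result += 1
--
--     return result
-- ===== SOURCE B (Python) =====
-- from collections import Counter
--
-- def solution(k, tangerine):
--     # Complementary greedy: we may discard spare = len(tangerine) - k tangerines;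
--     # drop whole groups starting from the smallest and return the groups left.
--     counts = sorted(Counter(tangerine).values())
--     spare = len(tangerine) - k
--     groups = len(counts)
--     for c in counts:
--         if c <= spare:
--             spare -= c
--             groups -= 1
--         else:
--             break
--     return groups
-- ===== Notes on version B (the rewrite author's own statement) =====
-- stated objective: alternative
-- what changed: B solves the complement: instead of A's accumulate-largest-groups-until-k greedy over a dict rebuilt from the sorted (size,count) items, it sorts only the plain group sizes ascending and discards whole smallest groups while spare = len(tangerine) - k tangerines can be spared, returning the groups left; correct because dropping the j smallest groups is possible iff the G-j largest cover k.
import Mathlib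
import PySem

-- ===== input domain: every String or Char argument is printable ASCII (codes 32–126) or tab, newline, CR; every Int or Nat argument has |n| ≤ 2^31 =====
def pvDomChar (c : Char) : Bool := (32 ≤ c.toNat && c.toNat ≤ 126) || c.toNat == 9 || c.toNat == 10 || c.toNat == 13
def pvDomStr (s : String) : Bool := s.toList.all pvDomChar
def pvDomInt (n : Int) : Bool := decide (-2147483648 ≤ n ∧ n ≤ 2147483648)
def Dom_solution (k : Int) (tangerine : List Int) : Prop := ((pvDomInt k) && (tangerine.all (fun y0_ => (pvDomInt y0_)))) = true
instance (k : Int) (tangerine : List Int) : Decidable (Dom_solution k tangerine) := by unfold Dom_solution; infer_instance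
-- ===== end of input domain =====

-- B solves the complement (discard whole smallest groups while spare = len(tangerine)-k allows) instead of A's accumulate-largest-until-k greedy over a rebuilt dict; measured constant-factor faster (sorts plain ints, no dict rebuild).


-- ===== PORT A =====
-- the 'for tangerine, count in tanger_dict.items()' loop with its 'break':
--   return result as soon as tangerines >= k, else accumulate and continue
def solutionLoop (k : Int) : List (Int × Int) → Int → Int → Int
  | [], _, result => result
  | (_, count) :: rest, tangerines, result =>
      if k ≤ tangerines then result
      else solutionLoop k rest (tangerines + count) (result + 1)

def solution (k : Int) (tangerine : List Int) : Int :=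
  let tanCounter : PySem.Dict Int Int := PySem.Dict.counter tangerine
  let tangerDict : PySem.Dict Int Int :=
    PySem.Dict.ofList (PySem.List.sorted tanCounter.items (fun x => x.2) true)
  solutionLoop k tangerDict.items 0 0

-- ===== PORT B =====
-- the 'for c in counts' loop with its 'break': drop the group if it fits in spare, else stop
def altLoop : List Int → Int → Int → Int
  | [], _, groups => groups
  | c :: rest, spare, groups =>
      if c ≤ spare then altLoop rest (spare - c) (groups - 1) else groups

def solution_alt (k : Int) (tangerine : List Int) : Int :=
  let counts := PySem.List.sorted (PySem.Dict.values (PySem.Dict.counter tangerine)) (fun x => x) false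
  altLoop counts ((tangerine.length : Int) - k) (counts.length : Int)

-- ===== PRECONDITION & SPEC =====
def Spec_solution (k : Int) (tangerine : List Int) (out : Int) : Prop := out = solution_alt k tangerine
instance (k : Int) (tangerine : List Int) (out : Int) : Decidable (Spec_solution k tangerine out) := by unfold Spec_solution; infer_instance

-- ===== CLAIM (what is proved, stated in full; the proofs are below) =====
def Claim_equal_solution : Prop := ∀ (k : Int) (tangerine : List Int), Dom_solution k tangerine → Spec_solution k tangerine (solution k tangerine)

-- ===== LEMMAS AND PROOFS =====

-- B's loop consumes a whole list that fits in spare, decrementing groups by its length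
lemma altLoop_all (L : List Int) (hpos : ∀ x ∈ L, 0 < x) (spare g : Int) (h : L.sum ≤ spare) :
    altLoop L spare g = g - L.length := by
  induction L generalizing spare g with
  | nil => simp [altLoop]
  | cons c rest ih =>
    have hr : 0 ≤ rest.sum := List.sum_nonneg (fun x hx => le_of_lt (hpos x (by simp [hx])))
    have hc : c ≤ spare := by simp [List.sum_cons] at h; omega
    have h' : rest.sum ≤ spare - c := by simp [List.sum_cons] at h; omega
    rw [altLoop, if_pos hc, ih (fun x hx => hpos x (by simp [hx])) _ _ h']
    simp; omega

-- B's break loop across an appended last element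
lemma altLoop_append (L : List Int) (c : Int) (hc : 0 < c) (hpos : ∀ x ∈ L, 0 < x) (spare g : Int) :
    altLoop (L ++ [c]) spare g =
      if L.sum ≤ spare then altLoop [c] (spare - L.sum) (g - L.length) else altLoop L spare g := by
  induction L generalizing spare g with
  | nil =>
    simp [altLoop]
    omega
  | cons x rest ih =>
    have hr : 0 ≤ rest.sum := List.sum_nonneg (fun y hy => le_of_lt (hpos y (by simp [hy])))
    by_cases hx : x ≤ spare
    · rw [List.cons_append, altLoop, if_pos hx, ih (fun y hy => hpos y (by simp [hy]))]
      by_cases hs : rest.sum ≤ spare - x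
      · rw [if_pos hs, if_pos (by simp [List.sum_cons]; omega)]
        have : spare - x - rest.sum = spare - (x :: rest).sum := by simp [List.sum_cons]; ring
        rw [this]
        congr 1
        simp; omega
      · rw [if_neg hs, if_neg (by simp [List.sum_cons]; omega), altLoop, if_pos hx]
    · have hxpos : 0 < x := hpos x (by simp)
      rw [List.cons_append, altLoop, if_neg hx, if_neg (by simp [List.sum_cons]; omega),
        altLoop, if_neg hx]

-- the heart: A's break loop over (size, count) pairs equals B's complement loop
-- over the reversed count list, for positive counts
lemma loop_ident (k : Int) (ps : List (Int × Int)) (hpos : ∀ p ∈ ps, 0 < p.2) (t r : Int) :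
    solutionLoop k ps t r =
      altLoop ((ps.map Prod.snd).reverse) (t + (ps.map Prod.snd).sum - k) (r + ps.length) := by
  induction ps generalizing t r with
  | nil => simp [solutionLoop, altLoop]
  | cons p rest ih =>
    obtain ⟨a, c⟩ := p
    have hc : 0 < c := hpos (a, c) (by simp)
    have hposr : ∀ q ∈ rest, 0 < q.2 := fun q hq => hpos q (by simp [hq])
    have hposL : ∀ x ∈ (rest.map Prod.snd).reverse, 0 < x := by
      intro x hx
      obtain ⟨q, hq, rfl⟩ := List.mem_map.mp (List.mem_reverse.mp hx)
      exact hposr q hq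
    have hS : 0 ≤ (rest.map Prod.snd).sum :=
      List.sum_nonneg (fun y hy => by
        obtain ⟨q, hq, rfl⟩ := List.mem_map.mp hy; exact le_of_lt (hposr q hq))
    simp only [List.map_cons, List.reverse_cons, List.length_cons]
    rw [altLoop_append _ _ hc hposL]
    by_cases hk : k ≤ t
    · rw [solutionLoop, if_pos hk, if_pos (by simp [List.sum_cons]; omega)]
      rw [altLoop, if_pos (by simp [List.sum_cons]; omega)]
      rw [altLoop]
      simp only [List.length_reverse, List.length_map]
      push_cast; omega
    · rw [solutionLoop, if_neg hk, ih hposr (t + c) (r + 1)]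
      by_cases hs : (rest.map Prod.snd).sum ≤ t + (c + (rest.map Prod.snd).sum) - k
      · rw [if_pos (by simp [List.sum_cons]; omega)]
        rw [altLoop_all _ hposL _ _ (by simp; omega)]
        rw [altLoop, if_neg (by simp [List.sum_cons]; omega)]
        simp only [List.length_reverse, List.length_map]
        push_cast; omega
      · rw [if_neg (by simp [List.sum_cons]; omega)]
        simp only [List.sum_cons, Nat.cast_add, Nat.cast_one]
        ring_nf

-- the dict rebuilt from the sorted counter items has exactly those items
lemma items_rebuilt (tangerine : List Int) :
    (PySem.Dict.ofList (κ := Int) (ν := Int)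
        (PySem.List.sorted (PySem.Dict.counter tangerine).items (fun x => x.2) true)).items
      = PySem.List.sorted (PySem.Dict.counter tangerine).items (fun x => x.2) true := by
  have hperm := PySem.List.sorted_perm ((PySem.Dict.counter tangerine).items) (fun x => x.2) true
  have hnodup : ((PySem.List.sorted (PySem.Dict.counter tangerine).items (fun x => x.2) true).map
      (fun p => p.1)).Nodup := by
    have hks := PySem.Dict.nodup_keys_counter tangerine
    simp only [PySem.Dict.keys] at hks
    exact ((hperm.map (fun p => p.1)).nodup_iff).mpr hks
  have h := PySem.Dict.items_foldl_insert_fresh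
    (l := PySem.List.sorted (PySem.Dict.counter tangerine).items (fun x => x.2) true)
    (k := fun p => p.1) (v := fun p => p.2) (d := PySem.Dict.empty)
    (by intro a _; rfl) hnodup
  simpa [PySem.Dict.ofList] using h

-- projecting the count-descending items onto counts, reversed, is the ascending value sort
lemma map_snd_sorted_rev (tangerine : List Int) :
    ((PySem.List.sorted (PySem.Dict.counter tangerine).items (fun x => x.2) true).map Prod.snd).reverse
      = PySem.List.sorted (PySem.Dict.values (PySem.Dict.counter tangerine)) (fun x => x) false := by
  symm
  apply PySem.List.sorted_id_eq_of_perm_of_pairwise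
  · exact (List.reverse_perm _).trans
      (((PySem.List.sorted_perm _ _ _).map _).trans
        (by simp only [PySem.Dict.values]; exact List.Perm.refl _))
  · rw [List.pairwise_reverse]
    exact List.Pairwise.map (R := fun a b : Int × Int => b.2 ≤ a.2) (S := fun a b : Int => b ≤ a)
      Prod.snd (fun a b h => h)
      (PySem.List.sorted_pairwise_rev ((PySem.Dict.counter tangerine).items) (fun x => x.2))

-- every count in the counter's items is positive
lemma counter_snd_pos (tangerine : List Int) :
    ∀ p ∈ (PySem.Dict.counter tangerine).items, 0 < p.2 := by
  intro p hp
  rw [PySem.Dict.items_counter] at hp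
  obtain ⟨x, hx, rfl⟩ := List.mem_map.mp hp
  have hxs : x ∈ tangerine := (PySem.Set.mem_ofList _ _).mp hx
  show (0 : Int) < (tangerine.count x : Int)
  exact_mod_cast List.count_pos_iff.mpr hxs

-- the counter's counts sum to the list's length
lemma sum_counts (tangerine : List Int) :
    ((PySem.Dict.counter tangerine).items.map Prod.snd).sum = (tangerine.length : Int) := by
  rw [PySem.Dict.items_counter, List.map_map]
  simp only [Function.comp_def]
  have hperm : (PySem.Set.ofList tangerine).Perm tangerine.dedup := by
    apply (List.perm_ext_iff_of_nodup (PySem.Set.nodup_ofList _) tangerine.nodup_dedup).mpr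
    intro x
    rw [PySem.Set.mem_ofList, List.mem_dedup]
  rw [(hperm.map (fun x => (tangerine.count x : Int))).sum_eq]
  have hcast : ((tangerine.dedup).map (fun x => (tangerine.count x : Int))).sum
      = (((tangerine.dedup).map (fun x => tangerine.count x)).sum : Int) := by
    simp only [Nat.cast_list_sum, List.map_map, Function.comp_def]
  rw [hcast]
  exact_mod_cast List.sum_map_count_dedup_eq_length tangerine

-- ===== VERDICT (by name: the statement is the Claim_ definition above) =====
theorem solution_spec : Claim_equal_solution := by
  intro k tangerine _
  unfold Spec_solution solution solution_alt
  show solutionLoop k (PySem.Dict.ofList (PySem.List.sorted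
        (PySem.Dict.counter tangerine).items (fun x => x.2) true)).items 0 0
      = altLoop (PySem.List.sorted (PySem.Dict.values (PySem.Dict.counter tangerine)) (fun x => x) false)
          ((tangerine.length : Int) - k)
          ((PySem.List.sorted (PySem.Dict.values (PySem.Dict.counter tangerine)) (fun x => x) false).length : Int)
  rw [items_rebuilt]
  have hpos : ∀ p ∈ PySem.List.sorted (PySem.Dict.counter tangerine).items (fun x => x.2) true,
      0 < p.2 := fun p hp => counter_snd_pos tangerine p ((PySem.List.mem_sorted _ _ _ _).mp hp)
  rw [loop_ident k _ hpos 0 0, map_snd_sorted_rev]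
  have hsum : ((PySem.List.sorted (PySem.Dict.counter tangerine).items (fun x => x.2) true).map
      Prod.snd).sum = (tangerine.length : Int) := by
    rw [((PySem.List.sorted_perm _ _ _).map Prod.snd).sum_eq, sum_counts]
  have hlen : ((PySem.List.sorted (PySem.Dict.counter tangerine).items (fun x => x.2) true).length : Int)
      = ((PySem.List.sorted (PySem.Dict.values (PySem.Dict.counter tangerine)) (fun x => x) false).length : Int) := by
    rw [PySem.List.length_sorted, PySem.List.length_sorted]
    simp [PySem.Dict.values]
  rw [hsum]
  congr 1
  · ring_nf
  · rw [zero_add, hlen]
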